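-- pv_equiv track=rewrite | github.com/NIC619/sharding-p2p-poc | test/simulation/run.py | get_degree_map
-- ===== SOURCE A (Python) =====
-- def get_degree_map(topology):
--     node_degree_map = {}
--     for con in topology:
--         for i in range(2):
--             cur_degree = node_degree_map.get(con[i])
--             if cur_degree is not None:
--                 node_degree_map[con[i]] = cur_degree + 1
--             else:
--                 node_degree_map[con[i]] = 1
--     return sorted(node_degree_map.items())
-- ===== SOURCE B (Python) =====
-- def get_degree_map(topology):
--     endpoints = []
--     for con in topology:
--         endpoints.append(con[0])
--         endpoints.append(con[1])
--     endpoints.sort()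
--     result = []
--     for v in endpoints:
--         if result and result[-1][0] == v:
--             result[-1] = (v, result[-1][1] + 1)
--         else:
--             result.append((v, 1))
--     return result
-- ===== Notes on version B (the rewrite author's own statement) =====
-- stated objective: alternative
-- what changed: Replaces A's dict-of-counts accumulation followed by sorting the items with a sort-then-scan strategy: flatten all edge endpoints into one list, sort it, and emit (node, run-length) pairs in a single linear scan over the sorted list.
import Mathlib
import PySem

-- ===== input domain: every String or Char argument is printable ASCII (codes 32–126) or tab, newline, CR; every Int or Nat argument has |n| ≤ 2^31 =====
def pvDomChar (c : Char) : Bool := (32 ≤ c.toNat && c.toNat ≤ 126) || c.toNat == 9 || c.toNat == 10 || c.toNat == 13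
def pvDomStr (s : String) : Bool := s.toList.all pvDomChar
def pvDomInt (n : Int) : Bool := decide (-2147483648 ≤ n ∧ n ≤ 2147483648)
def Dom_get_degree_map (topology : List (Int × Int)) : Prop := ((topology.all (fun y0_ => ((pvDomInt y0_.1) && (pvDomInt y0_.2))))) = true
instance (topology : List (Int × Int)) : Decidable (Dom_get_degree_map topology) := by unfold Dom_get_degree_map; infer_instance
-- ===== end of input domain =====

-- B replaces A's dict-of-counts + final items-sort by flatten-endpoints, sort, one linear
-- run-length scan (objective: alternative algorithm of similar cost).


-- ===== PORT A =====
-- tuple indexing con[i]; exact for i ∈ range(2), the only indices A uses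
def pvPairGet (con : Int × Int) (i : Int) : Int := if i = 0 then con.1 else con.2

-- the loop body: cur = d.get(k); d[k] = cur+1 if cur is not None else 1
def pvStepA (d : PySem.Dict Int Int) (k : Int) : PySem.Dict Int Int :=
  match d.get? k with
  | some c => d.insert k (c + 1)
  | none   => d.insert k 1

-- sorted(items) on pairs = Python's lexicographic tuple order = sorted2 by fst then snd
def get_degree_map (topology : List (Int × Int)) : List (Int × Int) :=
  PySem.List.sorted2
    ((topology.foldl
        (fun d con => (PySem.List.pyRange 0 2 1).foldl (fun d i => pvStepA d (pvPairGet con i)) d)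
        PySem.Dict.empty).items)
    Prod.fst Prod.snd

-- ===== PORT B =====
def pvFlatten (topology : List (Int × Int)) : List Int :=
  topology.foldl (fun acc con => acc ++ [con.1, con.2]) []

-- one scan step: merge v into the last run or open a new one (result[-1] update modelled
-- as dropLast ++ [updated last])
def pvGroupStep (res : List (Int × Int)) (v : Int) : List (Int × Int) :=
  match res.getLast? with
  | some p => if p.1 = v then res.dropLast ++ [(v, p.2 + 1)] else res ++ [(v, 1)]
  | none   => res ++ [(v, 1)]

def get_degree_map_alt (topology : List (Int × Int)) : List (Int × Int) :=
  (PySem.List.sorted (pvFlatten topology) (fun x => x)).foldl pvGroupStep []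

-- ===== PRECONDITION & SPEC =====
def Spec_get_degree_map (topology : List (Int × Int)) (out : List (Int × Int)) : Prop := out = get_degree_map_alt topology
instance (topology : List (Int × Int)) (out : List (Int × Int)) : Decidable (Spec_get_degree_map topology out) := by unfold Spec_get_degree_map; infer_instance

-- ===== CLAIM (what is proved, stated in full; the proofs are below) =====
def Claim_equal_get_degree_map : Prop := ∀ (topology : List (Int × Int)), Dom_get_degree_map topology → Spec_get_degree_map topology (get_degree_map topology)

-- ===== LEMMAS AND PROOFS =====

-- insertBy only consults `before x y` for y already in the list
lemma pv_insertBy_congr (f g : (Int × Int) → (Int × Int) → Bool) (x : Int × Int) :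
    ∀ (l : List (Int × Int)), (∀ y ∈ l, f x y = g x y) →
      PySem.List.insertBy f x l = PySem.List.insertBy g x l := by
  intro l
  induction l with
  | nil => intro _; rfl
  | cons y ys ih =>
    intro h
    have hy : f x y = g x y := h y (by simp)
    by_cases hg : g x y = true
    · simp [PySem.List.insertBy, hy, hg]
    · simp only [PySem.List.insertBy, hy, hg]
      simp [ih (fun z hz => h z (by simp [hz]))]

lemma pv_foldl_insertBy_congr (f g : (Int × Int) → (Int × Int) → Bool)
    (S : List (Int × Int)) (hfg : ∀ a ∈ S, ∀ b ∈ S, f a b = g a b) :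
    ∀ (xs acc : List (Int × Int)), (∀ a ∈ xs, a ∈ S) → (∀ a ∈ acc, a ∈ S) →
      xs.foldl (fun acc x => PySem.List.insertBy f x acc) acc
        = xs.foldl (fun acc x => PySem.List.insertBy g x acc) acc := by
  intro xs
  induction xs with
  | nil => intro acc _ _; rfl
  | cons x xs ih =>
    intro acc hxs hacc
    have hx : x ∈ S := hxs x (by simp)
    simp only [List.foldl_cons]
    rw [pv_insertBy_congr f g x acc (fun y hy => hfg x hx y (hacc y hy))]
    exact ih _ (fun a ha => hxs a (by simp [ha]))
      (fun a ha => by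
        rcases (PySem.List.mem_insertBy g x a acc).1 ha with h | h
        · exact h ▸ hx
        · exact hacc a h)

-- on a list with pairwise-distinct first components, Python's tuple sort is a sort by fst
lemma pv_sorted2_eq_sorted_fst (xs : List (Int × Int))
    (h : (xs.map Prod.fst).Nodup) :
    PySem.List.sorted2 xs Prod.fst Prod.snd = PySem.List.sorted xs Prod.fst := by
  have h2 : PySem.List.sorted2 xs Prod.fst Prod.snd
      = xs.foldl (fun acc x => PySem.List.insertBy
          (fun a b => decide (a.1 < b.1) || (!decide (b.1 < a.1) && decide (a.2 < b.2))) x acc) [] := rfl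
  rw [h2, PySem.List.sorted_eq_foldl_insertBy]
  apply pv_foldl_insertBy_congr _ _ xs _ xs [] (fun a ha => ha) (by simp)
  intro a ha b hb
  by_cases hab : a.1 = b.1
  · have : a = b := List.inj_on_of_nodup_map h ha hb hab
    subst this
    simp
  · rcases lt_trichotomy a.1 b.1 with hlt | heq | hgt
    · simp [hlt]
    · exact absurd heq hab
    · simp [hgt, lt_asymm hgt]

-- A's nested loop is the endpoint-stream fold
lemma pv_afold_eq (t : List (Int × Int)) :
    ∀ d, t.foldl
        (fun d con => (PySem.List.pyRange 0 2 1).foldl (fun d i => pvStepA d (pvPairGet con i)) d) d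
      = (t.flatMap (fun c => [c.1, c.2])).foldl pvStepA d := by
  induction t with
  | nil => intro d; rfl
  | cons c t ih =>
    intro d
    have hr : PySem.List.pyRange 0 2 1 = [0, 1] := by decide
    simp only [List.foldl_cons, List.flatMap_cons, List.foldl_append, hr,
      List.foldl_nil, pvPairGet]
    norm_num
    exact ih _

lemma pv_stepA_eq (d : PySem.Dict Int Int) (k : Int) :
    pvStepA d k = d.insert k (d.getD k 0 + 1) := by
  unfold pvStepA
  cases h : d.get? k <;> simp [PySem.Dict.getD, h]

-- A's value: the lexicographic sort of Counter(endpoint stream).items()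
lemma pv_A_eq (t : List (Int × Int)) :
    get_degree_map t
      = PySem.List.sorted2 (PySem.Dict.counter (t.flatMap (fun c => [c.1, c.2]))).items
          Prod.fst Prod.snd := by
  unfold get_degree_map
  rw [pv_afold_eq]
  have hstep : pvStepA = fun d x => PySem.Dict.insert d x (d.getD x 0 + 1) :=
    funext fun d => funext fun k => pv_stepA_eq d k
  rw [hstep, PySem.Dict.foldl_insert_getD_add_one_eq_counter]

lemma pv_flatten_eq (t : List (Int × Int)) :
    pvFlatten t = t.flatMap (fun c => [c.1, c.2]) := by
  unfold pvFlatten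
  simpa using PySem.List.foldl_append_eq_flatMap (fun c : Int × Int => [c.1, c.2]) t []

lemma pv_foldl_add_sublist : ∀ (zs s : List Int), List.Sublist (zs.foldl PySem.Set.add s) (s ++ zs) := by
  intro zs
  induction zs with
  | nil => intro s; simp
  | cons x zs ih =>
    intro s
    refine (ih (PySem.Set.add s x)).trans ?_
    rw [PySem.Set.add_eq_ite]
    by_cases hx : x ∈ s
    · rw [if_pos hx]
      exact (List.append_sublist_append_left s).2 (List.sublist_cons_self x zs)
    · rw [if_neg hx, List.append_assoc]
      exact List.Sublist.refl _

lemma pv_ofList_sublist (zs : List Int) : List.Sublist (PySem.Set.ofList zs) zs := by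
  simpa [PySem.Set.ofList, PySem.Set.empty] using pv_foldl_add_sublist zs []

lemma pv_ofList_pairwise_lt (zs : List Int) (h : zs.Pairwise (· ≤ ·)) :
    (PySem.Set.ofList zs).Pairwise (· < ·) := by
  have hle : (PySem.Set.ofList zs).Pairwise (· ≤ ·) := h.sublist (pv_ofList_sublist zs)
  have hnd : (PySem.Set.ofList zs).Pairwise (· ≠ ·) := PySem.Set.nodup_ofList zs
  exact (hle.and hnd).imp (fun hab => lt_of_le_of_ne hab.1 hab.2)

lemma pv_concat_max (S' : List Int) (L : Int) (h : (S' ++ [L]).Pairwise (· ≤ ·)) :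
    ∀ x ∈ S' ++ [L], x ≤ L := by
  intro x hx
  rcases List.mem_append.1 hx with h1 | h2
  · exact (List.pairwise_append.1 h).2.2 x h1 L (by simp)
  · simp only [List.mem_singleton] at h2
    exact le_of_eq h2

lemma pv_concat_ne (S' : List Int) (L : Int) (h : (S' ++ [L]).Nodup) :
    ∀ x ∈ S', x ≠ L := by
  intro x hx
  exact (List.pairwise_append.1 h).2.2 x hx L (by simp)

lemma pv_ofList_append_singleton (ys : List Int) (v : Int) :
    PySem.Set.ofList (ys ++ [v]) = PySem.Set.add (PySem.Set.ofList ys) v := by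
  simp [PySem.Set.ofList, List.foldl_append]

-- the scan over a sorted list produces (distinct value, multiplicity) pairs in order
lemma pv_group_sorted : ∀ (zs : List Int), zs.Pairwise (· ≤ ·) →
    zs.foldl pvGroupStep []
      = (PySem.Set.ofList zs).map (fun k => (k, (zs.count k : Int))) := by
  intro zs
  induction zs using List.reverseRecOn with
  | nil => intro _; rfl
  | append_singleton ys v ih =>
    intro h
    have hys : ys.Pairwise (· ≤ ·) := (List.pairwise_append.1 h).1
    have hle : ∀ y ∈ ys, y ≤ v := fun y hy => (List.pairwise_append.1 h).2.2 y hy v (by simp)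
    rw [List.foldl_append, ih hys]
    simp only [List.foldl_cons, List.foldl_nil]
    have hSle : (PySem.Set.ofList ys).Pairwise (· ≤ ·) := hys.sublist (pv_ofList_sublist ys)
    have hNd : (PySem.Set.ofList ys).Nodup := PySem.Set.nodup_ofList ys
    by_cases hmem : v ∈ ys
    · -- v already seen: merge into the last run
      have hof : PySem.Set.ofList (ys ++ [v]) = PySem.Set.ofList ys := by
        rw [pv_ofList_append_singleton]
        exact PySem.Set.add_of_mem ((PySem.Set.mem_ofList ys v).2 hmem)
      have hvS : v ∈ PySem.Set.ofList ys := (PySem.Set.mem_ofList ys v).2 hmem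
      obtain ⟨S', L, hSdec⟩ : ∃ S' L, PySem.Set.ofList ys = S' ++ [L] := by
        rcases List.eq_nil_or_concat (PySem.Set.ofList ys) with hS | ⟨S', L, hS⟩
        · rw [hS] at hvS; simp at hvS
        · exact ⟨S', L, by simpa [List.concat_eq_append] using hS⟩
      have hLys : L ∈ ys := (PySem.Set.mem_ofList ys L).1 (by rw [hSdec]; simp)
      have hLv : L = v := by
        refine le_antisymm (hle L hLys) ?_
        exact pv_concat_max S' L (hSdec ▸ hSle) v (hSdec ▸ hvS)
      subst hLv
      have hne : ∀ x ∈ S', x ≠ L := pv_concat_ne S' L (hSdec ▸ hNd)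
      rw [hof, hSdec, List.map_append, List.map_append]
      simp only [List.map_cons, List.map_nil]
      simp only [pvGroupStep, List.getLast?_concat, List.dropLast_concat]
      rw [if_pos trivial]
      congr 1
      · -- unchanged prefix of runs
        refine List.map_congr_left (fun k hk => ?_)
        have hkL : k ≠ L := hne k hk
        simp [List.count_append, Ne.symm hkL]
      · -- the last run gains one
        simp [List.count_append]
    · -- new largest value: open a new run
      have hof : PySem.Set.ofList (ys ++ [v]) = PySem.Set.ofList ys ++ [v] := by
        rw [pv_ofList_append_singleton]
        exact PySem.Set.add_of_not_mem (fun hc => hmem ((PySem.Set.mem_ofList ys v).1 hc))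
      have hcnt0 : List.count v ys = 0 := List.count_eq_zero_of_not_mem hmem
      have hmapS : (PySem.Set.ofList ys).map (fun k => (k, ((ys ++ [v]).count k : Int)))
          = (PySem.Set.ofList ys).map (fun k => (k, (ys.count k : Int))) := by
        refine List.map_congr_left (fun k hk => ?_)
        have hkv : k ≠ v := fun hkv => hmem (hkv ▸ (PySem.Set.mem_ofList ys k).1 hk)
        simp [List.count_append, Ne.symm hkv]
      rw [hof, List.map_append, hmapS]
      simp only [List.map_cons, List.map_nil]
      rcases List.eq_nil_or_concat (PySem.Set.ofList ys) with hS | ⟨S', L, hS⟩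
      · rw [hS]
        simp [pvGroupStep, List.count_append, hcnt0]
      · have hSdec : PySem.Set.ofList ys = S' ++ [L] := by
          simpa [List.concat_eq_append] using hS
        have hLys : L ∈ ys := (PySem.Set.mem_ofList ys L).1 (by rw [hSdec]; simp)
        have hLv : L ≠ v := fun hLv => hmem (hLv ▸ hLys)
        rw [hSdec, List.map_append]
        simp only [List.map_cons, List.map_nil]
        simp only [pvGroupStep, List.getLast?_concat]
        rw [if_neg hLv]
        simp [List.count_append, hcnt0]

-- ===== VERDICT (by name: the statement is the Claim_ definition above) =====
theorem get_degree_map_spec : Claim_equal_get_degree_map := by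
  unfold Claim_equal_get_degree_map
  intro t _
  unfold Spec_get_degree_map
  rw [pv_A_eq]
  unfold get_degree_map_alt
  rw [pv_flatten_eq]
  have hzp : (PySem.List.sorted (t.flatMap (fun c => [c.1, c.2])) (fun x => x)).Pairwise (· ≤ ·) :=
    PySem.List.sorted_pairwise _ _
  rw [pv_group_sorted _ hzp]
  have hcnt : ∀ k : Int,
      (PySem.List.sorted (t.flatMap (fun c => [c.1, c.2])) (fun x => x)).count k
        = (t.flatMap (fun c => [c.1, c.2])).count k :=
    fun k => (PySem.List.sorted_perm (t.flatMap (fun c => [c.1, c.2])) (fun x => x) false).count_eq k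
  have hmapc :
      (PySem.Set.ofList (PySem.List.sorted (t.flatMap (fun c => [c.1, c.2])) (fun x => x))).map
          (fun k => (k, ((PySem.List.sorted (t.flatMap (fun c => [c.1, c.2])) (fun x => x)).count k : Int)))
        = (PySem.Set.ofList (PySem.List.sorted (t.flatMap (fun c => [c.1, c.2])) (fun x => x))).map
          (fun k => (k, ((t.flatMap (fun c => [c.1, c.2])).count k : Int))) := by
    refine List.map_congr_left (fun k _ => ?_)
    rw [hcnt k]
  rw [hmapc]
  have hfstnd : ((PySem.Dict.counter (t.flatMap (fun c => [c.1, c.2]))).items.map Prod.fst).Nodup := by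
    rw [PySem.Dict.items_counter, List.map_map]
    have hcomp : (Prod.fst ∘ fun k : Int => (k, ((t.flatMap (fun c => [c.1, c.2])).count k : Int))) = id := rfl
    rw [hcomp, List.map_id]
    exact PySem.Set.nodup_ofList _
  rw [pv_sorted2_eq_sorted_fst _ hfstnd]
  apply PySem.List.sorted_eq_of_perm_of_pairwise_lt
  · -- the run list is a rearrangement of the counter's items
    rw [PySem.Dict.items_counter]
    refine List.Perm.map _ ?_
    refine (List.perm_ext_iff_of_nodup (PySem.Set.nodup_ofList _) (PySem.Set.nodup_ofList _)).2 ?_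
    intro a
    rw [PySem.Set.mem_ofList, PySem.Set.mem_ofList, PySem.List.mem_sorted]
  · -- strictly increasing first components
    refine List.Pairwise.map _ (fun a b hab => hab) ?_
    exact pv_ofList_pairwise_lt _ hzp
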